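-- pv_equiv track=rewrite | github.com/blzzua/codewars | 6-kyu/simple_fun_217_sort_by_guide.py | sort_by_guide
-- ===== SOURCE A (Python) =====
-- def sort_by_guide(arr, guide):
--     sorted_pairs = sorted([(a,b) for a,b in zip(guide, arr) if a != -1])
--     res = []
--     for i, val in enumerate(arr):
--         if guide[i] == -1:
--             res.append(val)
--         else:
--             res.append(sorted_pairs.pop(0)[1])
--     return res
-- ===== SOURCE B (Python) =====
-- def sort_by_guide(arr, guide):
--     pairs = list(zip(guide, arr))
--     idxs = [i for i, (g, _) in enumerate(pairs) if g != -1]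
--     vals = [v for _, v in sorted(p for p in pairs if p[0] != -1)]
--     res = list(arr)
--     for i, v in zip(idxs, vals):
--         res[i] = v
--     return res
-- ===== Notes on version B (the rewrite author's own statement) =====
-- stated objective: faster
-- what changed: A rebuilds the result in one indexed pass whose per-element guide==-1 branch pops the front of the sorted queue (pop(0) shifts the whole list each time); B instead collects the movable indices, sorts the movable (guide, value) pairs once, and scatters the sorted values back into a copy of arr, with no per-element branching or queue consumption.
import Mathlib
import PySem

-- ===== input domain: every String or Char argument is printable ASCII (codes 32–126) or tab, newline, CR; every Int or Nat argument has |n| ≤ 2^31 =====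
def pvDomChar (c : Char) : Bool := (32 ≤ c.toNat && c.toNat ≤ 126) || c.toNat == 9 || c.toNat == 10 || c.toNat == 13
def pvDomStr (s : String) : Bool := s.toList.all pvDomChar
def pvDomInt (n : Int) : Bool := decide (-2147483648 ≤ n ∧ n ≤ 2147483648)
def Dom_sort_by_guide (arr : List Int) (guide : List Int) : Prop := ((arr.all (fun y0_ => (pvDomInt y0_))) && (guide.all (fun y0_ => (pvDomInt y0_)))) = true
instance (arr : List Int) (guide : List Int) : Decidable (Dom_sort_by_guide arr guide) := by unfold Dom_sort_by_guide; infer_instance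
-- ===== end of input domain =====

-- B replaces A's branch-and-pop rebuild by a sort of the movable pairs followed by a
-- scatter of the sorted values into a copy of arr, avoiding A's quadratic pop(0)
-- (objective: faster; measured).

-- ===== PORT A =====
-- loop body of A's 'for i, val in enumerate(arr)' pass (named so the fold is readable)
def pvStepA (guide : List Int) (st : List Int × List (Int × Int)) (iv : Int × Int) :
    List Int × List (Int × Int) :=
  if PySem.List.pyGet? guide iv.1 = some (-1) then (st.1 ++ [iv.2], st.2)
  else match st.2 with
    | [] => (st.1 ++ [iv.2], [])   -- Python raises IndexError (pop from empty) here; unreachable under Pre_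
    | p :: rest => (st.1 ++ [p.2], rest)

def sort_by_guide (arr : List Int) (guide : List Int) : List Int :=
  let sorted_pairs := PySem.List.sorted2 ((List.zip guide arr).filter (fun p => p.1 != -1)) (·.1) (·.2)
  ((PySem.List.enumerate arr).foldl (pvStepA guide) ([], sorted_pairs)).1

-- ===== PORT B =====
def sort_by_guide_alt (arr : List Int) (guide : List Int) : List Int :=
  let pairs := List.zip guide arr
  let idxs := ((PySem.List.enumerate pairs).filter (fun x => x.2.1 != -1)).map (·.1)
  let vals := (PySem.List.sorted2 (pairs.filter (fun p => p.1 != -1)) (·.1) (·.2)).map (·.2)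
  (List.zip idxs vals).foldl (fun res iv => PySem.List.pySetD res iv.1 iv.2) arr

-- ===== PRECONDITION & SPEC =====
-- Pre_ excludes inputs where guide is shorter than arr, on which A raises IndexError at guide[i].
def Pre_sort_by_guide (arr : List Int) (guide : List Int) : Prop := arr.length ≤ guide.length
instance (arr : List Int) (guide : List Int) : Decidable (Pre_sort_by_guide arr guide) := by unfold Pre_sort_by_guide; infer_instance
def pvWitness_sort_by_guide : List Int × List Int := ([3, 1, 2], [1, -1, 0])

def Spec_sort_by_guide (arr : List Int) (guide : List Int) (out : List Int) : Prop := out = sort_by_guide_alt arr guide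
instance (arr : List Int) (guide : List Int) (out : List Int) : Decidable (Spec_sort_by_guide arr guide out) := by unfold Spec_sort_by_guide; infer_instance

-- ===== CLAIM (what is proved, stated in full; the proofs are below) =====
def Claim_equal_sort_by_guide : Prop := ∀ (arr : List Int) (guide : List Int), Dom_sort_by_guide arr guide → Pre_sort_by_guide arr guide → Spec_sort_by_guide arr guide (sort_by_guide arr guide)

-- ===== LEMMAS AND PROOFS =====

-- Common characterisation: walk the (guide, value) pairs, keeping a value where the
-- guide is -1 and otherwise taking the next value from the queue s.
def pvMerge : List (Int × Int) → List (Int × Int) → List Int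
  | [], _ => []
  | (g, a) :: ps, s =>
    if g = -1 then a :: pvMerge ps s
    else match s with
      | [] => a :: pvMerge ps []
      | p :: rest => p.2 :: pvMerge ps rest

theorem pvMerge_nil_queue (ps : List (Int × Int)) : pvMerge ps [] = ps.map (·.2) := by
  induction ps with
  | nil => rfl
  | cons p ps ih => obtain ⟨g, a⟩ := p; by_cases h : g = -1 <;> simp [pvMerge, h, ih]

theorem pvSet_append (pre t : List Int) (a v : Int) :
    (pre ++ a :: t).set pre.length v = pre ++ v :: t := by
  induction pre with
  | nil => rfl
  | cons x pre ih => simp [ih]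

theorem A_loop (guide : List Int) (arr gs : List Int) (k : Nat) (acc : List Int)
    (s : List (Int × Int)) (hd : guide.drop k = gs) (hl : arr.length ≤ gs.length) :
    ((PySem.List.enumerate arr (k : Int)).foldl (pvStepA guide) (acc, s)).1
    = acc ++ pvMerge (List.zip gs arr) s := by
  induction arr generalizing gs k acc s with
  | nil => simp [PySem.List.enumerate_nil, pvMerge]
  | cons a arr ih =>
    cases gs with
    | nil => simp at hl
    | cons g gs =>
      have hget : guide[k]? = some g := by
        have h0 : guide[k]? = (guide.drop k)[0]? := by simp [List.getElem?_drop]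
        rw [h0, hd]; rfl
      have hd' : guide.drop (k + 1) = gs := by
        have h2 := congrArg (List.drop 1) hd
        simpa [List.drop_drop, Nat.add_comm] using h2
      have hl' : arr.length ≤ gs.length := by simpa using hl
      have hcast : ((k : Int) + 1) = ((k + 1 : Nat) : Int) := by push_cast; ring
      rw [PySem.List.enumerate_cons, List.foldl_cons]
      by_cases hg : g = -1
      · have hstep : pvStepA guide (acc, s) ((k : Int), a) = (acc ++ [a], s) := by
          simp [pvStepA, hget, hg]
        rw [hstep, hcast, ih gs (k + 1) (acc ++ [a]) s hd' hl']
        simp [pvMerge, hg]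
      · cases s with
        | nil =>
          have hstep : pvStepA guide (acc, []) ((k : Int), a) = (acc ++ [a], []) := by
            simp [pvStepA, hget, hg]
          rw [hstep, hcast, ih gs (k + 1) (acc ++ [a]) [] hd' hl']
          simp [pvMerge, hg]
        | cons p rest =>
          have hstep : pvStepA guide (acc, p :: rest) ((k : Int), a) = (acc ++ [p.2], rest) := by
            simp [pvStepA, hget, hg]
          rw [hstep, hcast, ih gs (k + 1) (acc ++ [p.2]) rest hd' hl']
          simp [pvMerge, hg]

theorem B_loop (ps s : List (Int × Int)) (pre : List Int) :
    (List.zip (((PySem.List.enumerate ps (pre.length : Int)).filter (fun x => x.2.1 != -1)).map (·.1))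
        (s.map (·.2))).foldl (fun res iv => PySem.List.pySetD res iv.1 iv.2)
        (pre ++ ps.map (·.2))
    = pre ++ pvMerge ps s := by
  induction ps generalizing s pre with
  | nil => simp [PySem.List.enumerate_nil, pvMerge]
  | cons p ps ih =>
    obtain ⟨g, a⟩ := p
    rw [PySem.List.enumerate_cons, List.filter_cons]
    by_cases hg : g = -1
    · rw [if_neg (show ¬ ((((pre.length : Int)), (g, a)).2.1 != -1) = true by simp [hg])]
      simpa [pvMerge, hg] using ih s (pre ++ [a])
    · rw [if_pos (show ((((pre.length : Int)), (g, a)).2.1 != -1) = true by simp [hg])]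
      cases s with
      | nil =>
        simp [pvMerge, hg, pvMerge_nil_queue]
      | cons q rest =>
        simpa [pvMerge, hg, pvSet_append] using ih rest (pre ++ [q.2])

-- ===== VERDICT (by name: the statement is the Claim_ definition above) =====
theorem sort_by_guide_spec : Claim_equal_sort_by_guide := by
  intro arr guide _ hpre
  unfold Pre_sort_by_guide at hpre
  unfold Spec_sort_by_guide sort_by_guide sort_by_guide_alt
  have hsnd : (List.zip guide arr).map (·.2) = arr := List.map_snd_zip hpre
  have hA := A_loop guide arr guide 0 []
    (PySem.List.sorted2 ((List.zip guide arr).filter (fun p => p.1 != -1)) (·.1) (·.2))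
    (by simp) (by simpa using hpre)
  have hB := B_loop (List.zip guide arr)
    (PySem.List.sorted2 ((List.zip guide arr).filter (fun p => p.1 != -1)) (·.1) (·.2)) []
  simp only [List.length_nil, Nat.cast_zero, List.nil_append] at hA hB
  rw [hsnd] at hB
  simp only []
  rw [hA, hB]
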